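-- pv_equiv track=rewrite | github.com/EmilioGalimberti/finalAED | practico/PARCIAL 2/parcial 2.py | xd
-- ===== SOURCE A (Python) =====
-- def es_vocal(caracter):
--     return caracter in "aeiouAEIOU"
--
-- def es_digito(caracter):
--     return caracter in "0123456789"
--
-- def xd(texto):
--                 cont_letras = 0
--                 acumulador = 0
--                 vocal = False
--                 digito = False
--                 for caracter in texto:
--                     if caracter != " " and caracter != ".": #contador letra
--                         cont_letras += 1
--                         if es_vocal(caracter):
--                             vocal = True
--                         if es_digito(caracter):
--                             digito = True
--                     else:
--                         if vocal is True and digito is True: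
--                             acumulador += 1
--
--                         cont_letras = 0
--                         vocal = 0
--                         digito = 0
--
--
--                 return acumulador
-- ===== SOURCE B (Python) =====
-- def es_vocal(caracter):
--     return caracter in "aeiouAEIOU"
--
-- def es_digito(caracter):
--     return caracter in "0123456789"
--
-- def xd(texto):
--     # tokenize: separator-terminated words are all split fields except the last
--     return sum(1 for w in texto.replace(".", " ").split(" ")[:-1]
--                if any(es_vocal(c) for c in w) and any(es_digito(c) for c in w))
-- ===== Notes on version B (the rewrite author's own statement) =====
-- stated objective: simpler
-- what changed: Replaces the per-character flag/counter state machine with tokenization: normalize dots to spaces, split into fields, drop the final unterminated field, and count fields containing both a vowel and a digit with any().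
import Mathlib
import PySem

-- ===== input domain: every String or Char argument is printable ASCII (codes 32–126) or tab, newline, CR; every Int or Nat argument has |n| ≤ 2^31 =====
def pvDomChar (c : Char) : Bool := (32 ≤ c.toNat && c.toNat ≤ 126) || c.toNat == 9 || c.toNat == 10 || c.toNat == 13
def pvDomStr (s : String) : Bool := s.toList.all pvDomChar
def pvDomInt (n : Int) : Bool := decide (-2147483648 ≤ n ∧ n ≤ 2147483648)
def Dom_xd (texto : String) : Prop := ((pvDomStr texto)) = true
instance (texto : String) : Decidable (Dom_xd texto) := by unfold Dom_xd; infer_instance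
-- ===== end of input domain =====

-- B replaces A's per-character flag state machine by tokenization (replace '.'→' ',
-- split on ' ', drop the final unterminated field) plus a filter; objective: simpler.

-- ===== PORT A =====
def esVocal (caracter : Char) : Bool := "aeiouAEIOU".toList.contains caracter

def esDigito (caracter : Char) : Bool := "0123456789".toList.contains caracter

-- the for-loop over the characters, state (cont_letras, acumulador, vocal, digito)
def xdLoop : List Char → Int → Int → Bool → Bool → Int
  | [], _, acumulador, _, _ => acumulador
  | caracter :: rest, cont, acumulador, vocal, digito =>
    if caracter ≠ ' ' ∧ caracter ≠ '.' then
      xdLoop rest (cont + 1) acumulador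
        (if esVocal caracter then true else vocal)
        (if esDigito caracter then true else digito)
    else
      xdLoop rest 0 (if vocal = true ∧ digito = true then acumulador + 1 else acumulador)
        false false

def xd (texto : String) : Int := xdLoop texto.toList 0 0 false false

-- ===== PORT B =====
def xd_alt (texto : String) : Int :=
  ((((texto.toList.map (fun c => if c = '.' then ' ' else c)).splitOn ' ').dropLast).foldl
    (fun acc w => if w.any esVocal && w.any esDigito then acc + 1 else acc) 0)

-- ===== PRECONDITION & SPEC =====
def Spec_xd (texto : String) (out : Int) : Prop := out = xd_alt texto
instance (texto : String) (out : Int) : Decidable (Spec_xd texto out) := by unfold Spec_xd; infer_instance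

-- ===== CLAIM (what is proved, stated in full; the proofs are below) =====
def Claim_equal_xd : Prop := ∀ (texto : String), Dom_xd texto → Spec_xd texto (xd texto)

-- ===== LEMMAS AND PROOFS =====

def pvSep (c : Char) : Bool := c == ' ' || c == '.'

-- count of qualifying fields among all but the last, first field's flags augmented by (v, d)
def pvCCount : List (List Char) → Bool → Bool → Int
  | [], _, _ => 0
  | [_], _, _ => 0
  | s :: r :: t, v, d =>
    (if (v || s.any esVocal) && (d || s.any esDigito) then 1 else 0) + pvCCount (r :: t) false false

theorem pvSplit_repl (l : List Char) :
    (l.map (fun c => if c = '.' then ' ' else c)).splitOn ' ' = l.splitOnP pvSep := by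
  induction l with
  | nil => rfl
  | cons c rest ih =>
    by_cases h1 : c = '.'
    · subst h1
      simp only [List.map_cons, List.splitOn, List.splitOnP_cons] at *
      simp [pvSep, ih]
    · by_cases h2 : c = ' '
      · subst h2
        simp only [List.map_cons, List.splitOn, List.splitOnP_cons] at *
        simp [pvSep, ih]
      · simp only [List.map_cons, if_neg h1, List.splitOn, List.splitOnP_cons] at *
        simp [pvSep, h1, h2, ih]

theorem pvCCount_modifyHead (S : List (List Char)) (hS : S ≠ []) (c : Char) (v d : Bool) :
    pvCCount (S.modifyHead (List.cons c)) v d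
      = pvCCount S (if esVocal c then true else v) (if esDigito c then true else d) := by
  match S with
  | [] => exact absurd rfl hS
  | [s] => rfl
  | s :: r :: t =>
    simp only [List.modifyHead, pvCCount, List.any_cons]
    by_cases hv : esVocal c <;> by_cases hd : esDigito c <;> simp [hv, hd]

theorem pvMain (l : List Char) (cont acum : Int) (v d : Bool) :
    xdLoop l cont acum v d = acum + pvCCount (l.splitOnP pvSep) v d := by
  induction l generalizing cont acum v d with
  | nil => simp [xdLoop, List.splitOnP_nil, pvCCount]
  | cons c rest ih =>
    rcases hS : rest.splitOnP pvSep with _ | ⟨s, t⟩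
    · exact absurd hS (List.splitOnP_ne_nil _ _)
    · by_cases h : c ≠ ' ' ∧ c ≠ '.'
      · have hsep : pvSep c = false := by
          simp [pvSep]; exact ⟨h.1, h.2⟩
        rw [show xdLoop (c :: rest) cont acum v d =
              xdLoop rest (cont + 1) acum (if esVocal c then true else v)
                (if esDigito c then true else d) by simp [xdLoop, h]]
        rw [ih, List.splitOnP_cons, hsep]
        simp only [Bool.false_eq_true, if_false]
        rw [pvCCount_modifyHead _ (List.splitOnP_ne_nil _ _) c v d]
      · have hsep : pvSep c = true := by
          simp only [pvSep, Bool.or_eq_true, beq_iff_eq]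
          tauto
        have hcond : ¬ (c ≠ ' ' ∧ c ≠ '.') := h
        rw [show xdLoop (c :: rest) cont acum v d =
              xdLoop rest 0 (if v = true ∧ d = true then acum + 1 else acum) false false by
            simp only [xdLoop]; rw [if_neg hcond]]
        rw [ih, List.splitOnP_cons, hsep, if_pos rfl, hS]
        simp only [pvCCount, List.any_nil, Bool.or_false]
        cases v <;> cases d <;> simp <;> omega

theorem pvFoldl_dropLast (S : List (List Char)) (acc : Int) :
    (S.dropLast).foldl (fun acc w => if w.any esVocal && w.any esDigito then acc + 1 else acc) acc
      = acc + pvCCount S false false := by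
  induction S generalizing acc with
  | nil => simp [pvCCount]
  | cons s rest ih =>
    match rest with
    | [] => simp [pvCCount]
    | r :: t =>
      simp only [List.dropLast_cons_of_ne_nil (by simp : r :: t ≠ ([] : List (List Char))),
        List.foldl_cons, pvCCount, Bool.false_or]
      rw [ih]
      split <;> omega

-- ===== VERDICT (by name: the statement is the Claim_ definition above) =====
theorem xd_spec : Claim_equal_xd := by
  intro texto _
  unfold Spec_xd xd xd_alt
  rw [pvSplit_repl, pvFoldl_dropLast, pvMain]
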